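-- pv_equiv track=rewrite | github.com/whiteclips/interpretasi-dan-pengolahan-citra | script/operation.py | do_operation_gradient
-- ===== SOURCE A (Python) =====
-- def get_difference_of_point_in_array(point_1_x, point_1_y, point_2_x, point_2_y, array):
--     width = len(array)
--     height = len(array[0])
--     if (point_1_x < 0 or point_1_x >= width or point_1_y < 0 or point_1_y >= height):
--         point_1 = 0
--     else:
--         point_1 = array[point_1_x][point_1_y]
--     if (point_2_x < 0 or point_2_x >= width or point_2_y < 0 or point_2_y >= height):
--         point_2 = 0
--     else:
--         point_2 = array[point_2_x][point_2_y]
--     return abs(point_1 - point_2)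
--
-- def do_operation_gradient(array):
--     width = len(array)
--     height = len(array[0])
--     # for j in range(10):
--     #     line = ""
--     #     for i in range(10):
--     #         line = line + str(array[i][j]) + " "
--     #     print line
--     # print "-----"
--     result_array = [[None for y in range(height) ] for x in range(width)]
--     for i in range(width):
--         for j in range(height):
--             gradient_1 = get_difference_of_point_in_array(i - 1, j - 1, i + 1, j + 1, array)
--             gradient_2 = get_difference_of_point_in_array(i, j - 1, i, j + 1, array)
--             gradient_3 = get_difference_of_point_in_array(i + 1, j - 1, i - 1, j + 1, array)
--             gradient_4 = get_difference_of_point_in_array(i + 1, j, i - 1, j, array)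
--             result_array[i][j] = max(gradient_1, gradient_2, gradient_3, gradient_4)
--     # for j in range(10):
--     #     line = ""
--     #     for i in range(10):
--     #         line = line + str(result_array[i][j]) + " "
--     #     print line
--     return result_array
-- ===== SOURCE B (Python) =====
-- def do_operation_gradient(array):
--     width = len(array)
--     height = len(array[0])
--     zero = [0] * height
--
--     def shifted(dx, dy):
--         # grid whose (i, j) entry is array[i+dx][j+dy], 0 outside bounds
--         if dx == 1:
--             rows = (array[1:] + [zero])[:width]
--         elif dx == -1:
--             rows = ([zero] + array)[:width]
--         else:
--             rows = array
--         out = []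
--         for r in rows:
--             t = r[:height]
--             if dy == 1:
--                 out.append((t[1:] + [0])[:height])
--             elif dy == -1:
--                 out.append(([0] + t)[:height])
--             else:
--                 out.append(t)
--         return out
--
--     def absdiff(g, h):
--         return [[abs(a - b) for a, b in zip(ra, rb)] for ra, rb in zip(g, h)]
--
--     def emax(g, h):
--         return [[max(a, b) for a, b in zip(ra, rb)] for ra, rb in zip(g, h)]
--
--     result = absdiff(shifted(-1, -1), shifted(1, 1))
--     for dx1, dy1, dx2, dy2 in ((0, -1, 0, 1), (1, -1, -1, 1), (1, 0, -1, 0)):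
--         result = emax(result, absdiff(shifted(dx1, dy1), shifted(dx2, dy2)))
--     return result
-- ===== Notes on version B (the rewrite author's own statement) =====
-- stated objective: alternative
-- what changed: Replaces the per-cell quadruple of bounds-checked point lookups by a staged, whole-grid dataflow: a shift(dx,dy) pass builds eight zero-filled shifted copies of the grid via list slicing, absdiff subtracts opposite shifts elementwise, and the result is an elementwise-max fold over the four difference grids (no per-neighbour bounds test or helper call remains).
import Mathlib
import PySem

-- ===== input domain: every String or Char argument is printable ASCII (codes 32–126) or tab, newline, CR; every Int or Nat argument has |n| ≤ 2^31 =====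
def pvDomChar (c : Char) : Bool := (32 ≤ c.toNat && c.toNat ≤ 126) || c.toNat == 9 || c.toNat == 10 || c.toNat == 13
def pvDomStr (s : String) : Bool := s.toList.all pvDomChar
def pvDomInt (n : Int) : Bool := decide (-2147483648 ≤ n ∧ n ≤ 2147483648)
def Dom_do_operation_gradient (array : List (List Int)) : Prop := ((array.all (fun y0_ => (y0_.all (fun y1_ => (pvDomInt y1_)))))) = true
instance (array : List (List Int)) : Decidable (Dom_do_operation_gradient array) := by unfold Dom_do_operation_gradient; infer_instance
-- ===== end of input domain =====

-- B replaces A's per-cell bounds-checked point lookups by a staged whole-grid dataflow: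
-- eight zero-filled shifted copies built by slicing, elementwise abs-difference of opposite
-- shifts, and an elementwise-max fold of the four difference grids (alternative decomposition).

-- ===== PORT A =====
-- literal transliteration of the helper; the guarded reads are totalized with getD
-- (under Pre_ every executed read is in range, matching Python).
def get_difference_of_point_in_array (point_1_x point_1_y point_2_x point_2_y : Int)
    (array : List (List Int)) : Int :=
  let width : Int := array.length
  let height : Int := (array.headD []).length
  let point_1 : Int :=
    if point_1_x < 0 ∨ point_1_x ≥ width ∨ point_1_y < 0 ∨ point_1_y ≥ height then 0
    else (((PySem.List.pyGet? array point_1_x).getD []) |> (fun row => PySem.List.pyGet? row point_1_y)).getD 0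
  let point_2 : Int :=
    if point_2_x < 0 ∨ point_2_x ≥ width ∨ point_2_y < 0 ∨ point_2_y ≥ height then 0
    else (((PySem.List.pyGet? array point_2_x).getD []) |> (fun row => PySem.List.pyGet? row point_2_y)).getD 0
  |point_1 - point_2|

def do_operation_gradient (array : List (List Int)) : List (List Int) :=
  let width := array.length
  let height := (array.headD []).length
  (List.range width).map (fun (i : Nat) =>
    (List.range height).map (fun (j : Nat) =>
      let gradient_1 := get_difference_of_point_in_array ((i:Int) - 1) ((j:Int) - 1) ((i:Int) + 1) ((j:Int) + 1) array
      let gradient_2 := get_difference_of_point_in_array (i:Int) ((j:Int) - 1) (i:Int) ((j:Int) + 1) array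
      let gradient_3 := get_difference_of_point_in_array ((i:Int) + 1) ((j:Int) - 1) ((i:Int) - 1) ((j:Int) + 1) array
      let gradient_4 := get_difference_of_point_in_array ((i:Int) + 1) (j:Int) ((i:Int) - 1) (j:Int) array
      max (max (max gradient_1 gradient_2) gradient_3) gradient_4))

-- ===== PORT B =====
-- B's inner column shift (the if/elif in the row loop of shifted); Python slices
-- r[:height], t[1:], [:height] have nonnegative bounds, so take/drop are exact.
def pvColShift (height : Nat) (dy : Int) (r : List Int) : List Int :=
  let t := r.take height
  if dy = 1 then (t.drop 1 ++ [0]).take height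
  else if dy = -1 then (0 :: t).take height
  else t

-- B's shifted(dx, dy): grid whose (i, j) entry is array[i+dx][j+dy], 0 outside bounds
def pvShifted (array : List (List Int)) (width height : Nat) (dx dy : Int) : List (List Int) :=
  let zero : List Int := List.replicate height 0
  let rows := if dx = 1 then (array.drop 1 ++ [zero]).take width
              else if dx = -1 then (zero :: array).take width
              else array
  rows.map (pvColShift height dy)

def pvAbsdiff (g h : List (List Int)) : List (List Int) :=
  List.zipWith (fun ra rb => List.zipWith (fun a b => |a - b|) ra rb) g h

def pvEmax (g h : List (List Int)) : List (List Int) :=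
  List.zipWith (fun ra rb => List.zipWith (fun a b => max a b) ra rb) g h

def do_operation_gradient_alt (array : List (List Int)) : List (List Int) :=
  let width := array.length
  let height := (array.headD []).length
  let g1 := pvAbsdiff (pvShifted array width height (-1) (-1)) (pvShifted array width height 1 1)
  [((0:Int), (-1:Int), (0:Int), (1:Int)), (1, -1, -1, 1), (1, 0, -1, 0)].foldl
    (fun res d => pvEmax res
      (pvAbsdiff (pvShifted array width height d.1 d.2.1)
                 (pvShifted array width height d.2.2.1 d.2.2.2))) g1

-- ===== PRECONDITION & SPEC =====
-- Pre_ excludes exactly the inputs where Python A raises: the empty array (array[0]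
-- IndexError) and arrays with a row shorter than the first row (array[x][y] IndexError).
def Pre_do_operation_gradient (array : List (List Int)) : Prop :=
  array ≠ [] ∧ ∀ row ∈ array, (array.headD []).length ≤ row.length
instance (array : List (List Int)) : Decidable (Pre_do_operation_gradient array) := by
  unfold Pre_do_operation_gradient; infer_instance

def pvWitness_do_operation_gradient : List (List Int) := [[1, 2], [3, 4]]

def Spec_do_operation_gradient (array : List (List Int)) (out : List (List Int)) : Prop := out = do_operation_gradient_alt array
instance (array : List (List Int)) (out : List (List Int)) : Decidable (Spec_do_operation_gradient array out) := by unfold Spec_do_operation_gradient; infer_instance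

-- ===== CLAIM (what is proved, stated in full; the proofs are below) =====
def Claim_equal_do_operation_gradient : Prop := ∀ (array : List (List Int)), Dom_do_operation_gradient array → Pre_do_operation_gradient array → Spec_do_operation_gradient array (do_operation_gradient array)

-- ===== LEMMAS AND PROOFS =====

-- the value A's guarded read produces at integer coordinates (x, y)
def pvRead (array : List (List Int)) (x y : Int) : Int :=
  if x < 0 ∨ x ≥ (array.length : Int) ∨ y < 0 ∨ y ≥ ((array.headD []).length : Int) then 0
  else ((PySem.List.pyGet? array x).getD [] |> (fun row => PySem.List.pyGet? row y)).getD 0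

lemma pvRead_eq (array : List (List Int)) (x y : Int) :
    pvRead array x y =
      if x < 0 ∨ x ≥ (array.length : Int) ∨ y < 0 ∨ y ≥ ((array.headD []).length : Int) then 0
      else (array.getD x.toNat []).getD y.toNat 0 := by
  unfold pvRead
  split
  · rfl
  · rename_i hcond
    push_neg at hcond
    obtain ⟨hx0, hxw, hy0, hyh⟩ := hcond
    obtain ⟨i, rfl⟩ := Int.eq_ofNat_of_zero_le hx0
    obtain ⟨j, rfl⟩ := Int.eq_ofNat_of_zero_le hy0
    simp [PySem.List.pyGet?_natCast, List.getD_eq_getElem?_getD, Int.toNat_natCast]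

lemma getD_take_if {α : Type} (l : List α) (k n : Nat) (d : α) :
    (l.take n).getD k d = if k < n then l.getD k d else d := by
  rcases Nat.lt_or_ge k n with h|h
  · simp [List.getD_eq_getElem?_getD, List.getElem?_take, h]
  · have h1 : (l.take n)[k]? = none := List.getElem?_eq_none (by simp; omega)
    simp [List.getD_eq_getElem?_getD, h1, h]

lemma getD_append_sing {α : Type} (l : List α) (k : Nat) (d : α) :
    (l ++ [d]).getD k d = l.getD k d := by
  rcases lt_trichotomy k l.length with h|h|h
  · simp [List.getD_eq_getElem?_getD, List.getElem?_append, h]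
  · simp [List.getD_eq_getElem?_getD, h]
  · have h1 : (l ++ [d])[k]? = none := List.getElem?_eq_none (by simp; omega)
    have h2 : l[k]? = none := List.getElem?_eq_none (by omega)
    simp [List.getD_eq_getElem?_getD, h1, h2]

lemma colShift_length (h : Nat) (dy : Int) (r : List Int) (hr : h ≤ r.length) :
    (pvColShift h dy r).length = h := by
  unfold pvColShift
  split
  · simp; omega
  · split
    · simp; omega
    · simp; omega

-- entry of B's column shift: the guarded row read at column j + dy
lemma colShift_entry (h : Nat) (dy : Int) (r : List Int)
    (hdy : dy = 1 ∨ dy = -1 ∨ dy = 0) (j : Nat) (hj : j < h) :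
    (pvColShift h dy r).getD j 0 =
      if (j:Int) + dy < 0 ∨ (j:Int) + dy ≥ (h:Int) then 0 else r.getD ((j:Int) + dy).toNat 0 := by
  rcases hdy with rfl | rfl | rfl
  · -- dy = 1
    unfold pvColShift
    simp only [reduceIte]
    rw [getD_take_if, if_pos hj, getD_append_sing]
    have : (r.take h).drop 1 = (r.drop 1).take (h - 1) := by
      rw [List.drop_take]
    rw [this, getD_take_if]
    by_cases hcase : j + 1 < h
    · rw [if_pos (by omega)]
      have : ((j:Int) + 1).toNat = j + 1 := by omega
      rw [if_neg (by omega), this]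
      simp [List.getD_eq_getElem?_getD, List.getElem?_drop, Nat.add_comm 1 j]
    · rw [if_neg (by omega), if_pos (by omega)]
  · -- dy = -1
    unfold pvColShift
    simp only [reduceIte]
    rw [if_neg (by norm_num : ¬ ((-1:Int) = 1))]
    rw [getD_take_if, if_pos hj]
    rcases j with _ | j'
    · simp
    · have h00 : ((0 : Int) :: r.take h).getD (j' + 1) 0 = (r.take h).getD j' 0 := by
        simp [List.getD_eq_getElem?_getD]
      rw [h00, getD_take_if, if_pos (by omega)]
      have : (((j' + 1 : Nat) : Int) + -1).toNat = j' := by omega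
      rw [if_neg (by omega), this]
  · -- dy = 0
    unfold pvColShift
    simp only [reduceIte]
    rw [if_neg (by norm_num : ¬ ((0:Int) = 1)), if_neg (by norm_num : ¬ ((0:Int) = -1))]
    rw [getD_take_if, if_pos hj]
    rw [if_neg (by omega)]
    simp

-- the row B's shifted grid reads at row index i: A's guarded row (zeros outside)
lemma shifted_row (array : List (List Int)) (w h : Nat) (dx dy : Int)
    (hw : array.length = w) (hdx : dx = 1 ∨ dx = -1 ∨ dx = 0) (i : Nat) (hi : i < w) :
    (pvShifted array w h dx dy).getD i [] =
      pvColShift h dy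
        (if (i:Int) + dx < 0 ∨ (i:Int) + dx ≥ (w:Int) then List.replicate h 0
         else array.getD ((i:Int) + dx).toNat []) := by
  subst hw
  rcases hdx with rfl | rfl | rfl
  · -- dx = 1
    unfold pvShifted
    simp only [reduceIte]
    rw [List.map_take, List.map_append]
    rw [getD_take_if (d := ([] : List Int)), if_pos hi]
    by_cases hcase : i + 1 < array.length
    · have hlt : i < (array.drop 1).length := by simp; omega
      have this1 : ((array.drop 1).map (pvColShift h dy) ++ [List.replicate h 0].map (pvColShift h dy)).getD i []
          = pvColShift h dy (array.getD (((i:Int) + 1)).toNat []) := by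
        have ht : ((i:Int) + 1).toNat = i + 1 := by omega
        rw [ht, List.getD_eq_getElem?_getD, List.getElem?_append_left (by simpa using hlt),
            List.getElem?_map, List.getElem?_drop]
        have h1i : (1:Nat) + i = i + 1 := by omega
        rw [h1i, List.getElem?_eq_getElem (by omega : i + 1 < array.length)]
        rw [List.getD_eq_getElem?_getD, List.getElem?_eq_getElem (by omega : i + 1 < array.length)]
        simp
      rw [this1, if_neg (by omega)]
    · have hi1 : i = array.length - 1 := by omega
      have hlen : ((array.drop 1).map (pvColShift h dy)).length = array.length - 1 := by simp
      have : ((array.drop 1).map (pvColShift h dy) ++ [List.replicate h 0].map (pvColShift h dy)).getD i []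
          = pvColShift h dy (List.replicate h 0) := by
        rw [List.getD_eq_getElem?_getD, List.getElem?_append_right (by omega)]
        simp [hlen, hi1]
      rw [this, if_pos (by omega)]
  · -- dx = -1
    unfold pvShifted
    simp only [reduceIte]
    rw [if_neg (by norm_num : ¬ ((-1:Int) = 1))]
    rw [List.map_take, List.map_cons]
    rw [getD_take_if (d := ([] : List Int)), if_pos hi]
    rcases i with _ | i'
    · simp [if_pos (by omega : ((0:Nat):Int) + -1 < 0 ∨ ((0:Nat):Int) + -1 ≥ (array.length:Int))]
    · have h00 : (pvColShift h dy (List.replicate h 0) :: array.map (pvColShift h dy)).getD (i' + 1) []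
          = (array.map (pvColShift h dy)).getD i' [] := by
        simp [List.getD_eq_getElem?_getD]
      rw [h00, List.getD_eq_getElem?_getD, List.getElem?_map]
      have hlt : i' < array.length := by omega
      rw [List.getElem?_eq_getElem hlt]
      have : (((i' + 1 : Nat) : Int) + -1).toNat = i' := by omega
      rw [if_neg (by omega), this]
      simp [List.getD_eq_getElem?_getD, List.getElem?_eq_getElem hlt]
  · -- dx = 0
    unfold pvShifted
    simp only [reduceIte]
    rw [if_neg (by norm_num : ¬ ((0:Int) = 1)), if_neg (by norm_num : ¬ ((0:Int) = -1))]
    rw [List.getD_eq_getElem?_getD, List.getElem?_map, List.getElem?_eq_getElem hi]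
    rw [if_neg (by omega)]
    simp [List.getD_eq_getElem?_getD, List.getElem?_eq_getElem hi]

-- a grid is w×h with entry function f
def IsGrid (G : List (List Int)) (w h : Nat) (f : Nat → Nat → Int) : Prop :=
  G.length = w ∧ (∀ i, i < w → (G.getD i []).length = h) ∧
    (∀ i, i < w → ∀ j, j < h → (G.getD i []).getD j 0 = f i j)

lemma shifted_isGrid (array : List (List Int)) (w h : Nat) (dx dy : Int)
    (hw : array.length = w) (hh : (array.headD []).length = h)
    (hpre : ∀ row ∈ array, h ≤ row.length)
    (hdx : dx = 1 ∨ dx = -1 ∨ dx = 0) (hdy : dy = 1 ∨ dy = -1 ∨ dy = 0) :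
    IsGrid (pvShifted array w h dx dy) w h
      (fun i j => pvRead array ((i:Int) + dx) ((j:Int) + dy)) := by
  have hrowlen : ∀ i, i < w →
      h ≤ (if (i:Int) + dx < 0 ∨ (i:Int) + dx ≥ (w:Int) then List.replicate h 0
           else array.getD ((i:Int) + dx).toNat []).length := by
    intro i hi
    split
    · simp
    · rename_i hc
      push_neg at hc
      have hk : ((i:Int) + dx).toNat < array.length := by omega
      have hrw : array.getD ((i:Int) + dx).toNat [] = array[((i:Int) + dx).toNat] := by
        rw [List.getD_eq_getElem?_getD, List.getElem?_eq_getElem hk]; rfl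
      rw [hrw]
      exact hpre _ (List.getElem_mem hk)
  refine ⟨?_, ?_, ?_⟩
  · unfold pvShifted
    rcases hdx with rfl | rfl | rfl <;> simp <;> omega
  · intro i hi
    rw [shifted_row array w h dx dy hw hdx i hi]
    exact colShift_length h dy _ (hrowlen i hi)
  · intro i hi j hj
    dsimp only
    rw [shifted_row array w h dx dy hw hdx i hi,
        colShift_entry h dy _ hdy j hj, pvRead_eq, hw, hh]
    by_cases hy : (j:Int) + dy < 0 ∨ (j:Int) + dy ≥ (h:Int)
    · rw [if_pos hy, if_pos (by tauto)]
    · rw [if_neg hy]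
      by_cases hx : (i:Int) + dx < 0 ∨ (i:Int) + dx ≥ (w:Int)
      · rw [if_pos hx, if_pos (by tauto)]
        simp [List.getD_eq_getElem?_getD, List.getElem?_replicate]
        split <;> simp
      · rw [if_neg hx, if_neg (by tauto)]

lemma zip2_isGrid (F : Int → Int → Int) (g g' : List (List Int)) (w h : Nat)
    (f f' : Nat → Nat → Int) (hg : IsGrid g w h f) (hg' : IsGrid g' w h f') :
    IsGrid (List.zipWith (fun ra rb => List.zipWith F ra rb) g g') w h
      (fun i j => F (f i j) (f' i j)) := by
  obtain ⟨hl, hrl, he⟩ := hg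
  obtain ⟨hl', hrl', he'⟩ := hg'
  have hrow : ∀ i, i < w →
      (List.zipWith (fun ra rb => List.zipWith F ra rb) g g').getD i [] =
        List.zipWith F (g.getD i []) (g'.getD i []) := by
    intro i hi
    have hig : i < g.length := by omega
    have hig' : i < g'.length := by omega
    simp only [List.getD_eq_getElem?_getD, List.getElem?_zipWith,
      List.getElem?_eq_getElem hig, List.getElem?_eq_getElem hig']
    rfl
  refine ⟨by simp [hl, hl'], ?_, ?_⟩
  · intro i hi
    rw [hrow i hi, List.length_zipWith, hrl i hi, hrl' i hi, Nat.min_self]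
  · intro i hi j hj
    rw [hrow i hi]
    have hjg : j < (g.getD i []).length := by rw [hrl i hi]; omega
    have hjg' : j < (g'.getD i []).length := by rw [hrl' i hi]; omega
    have h1 : (g.getD i [])[j] = f i j := by
      have := he i hi j hj
      rwa [List.getD_eq_getElem?_getD, List.getElem?_eq_getElem hjg, Option.getD_some] at this
    have h2 : (g'.getD i [])[j] = f' i j := by
      have := he' i hi j hj
      rwa [List.getD_eq_getElem?_getD, List.getElem?_eq_getElem hjg', Option.getD_some] at this
    rw [List.getD_eq_getElem?_getD, List.getElem?_zipWith,
        List.getElem?_eq_getElem hjg, List.getElem?_eq_getElem hjg']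
    simp only [Option.map_some, Option.getD_some]
    rw [h1, h2]

lemma absdiff_isGrid (g g' : List (List Int)) (w h : Nat) (f f' : Nat → Nat → Int)
    (hg : IsGrid g w h f) (hg' : IsGrid g' w h f') :
    IsGrid (pvAbsdiff g g') w h (fun i j => |f i j - f' i j|) :=
  zip2_isGrid (fun a b => |a - b|) g g' w h f f' hg hg'

lemma emax_isGrid (g g' : List (List Int)) (w h : Nat) (f f' : Nat → Nat → Int)
    (hg : IsGrid g w h f) (hg' : IsGrid g' w h f') :
    IsGrid (pvEmax g g') w h (fun i j => max (f i j) (f' i j)) :=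
  zip2_isGrid (fun a b => max a b) g g' w h f f' hg hg'

-- two grids with the same dimensions and entries are equal
lemma grid_eq (G G' : List (List Int)) (w h : Nat) (f : Nat → Nat → Int)
    (hG : IsGrid G w h f) (hG' : IsGrid G' w h f) : G = G' := by
  obtain ⟨hl, hrl, he⟩ := hG
  obtain ⟨hl', hrl', he'⟩ := hG'
  apply List.ext_getElem (by omega)
  intro i hi _
  have hiw : i < w := by omega
  have hrow : G[i] = G.getD i [] := by
    rw [List.getD_eq_getElem?_getD, List.getElem?_eq_getElem hi]; rfl
  have hrow' : G'[i] = G'.getD i [] := by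
    rw [List.getD_eq_getElem?_getD, List.getElem?_eq_getElem]; rfl
  rw [hrow, hrow']
  apply List.ext_getElem (by rw [hrl i hiw, hrl' i hiw])
  intro j hj _
  have hjh : j < h := by rw [hrl i hiw] at hj; omega
  have h1 : (G.getD i [])[j] = f i j := by
    have := he i hiw j hjh
    rwa [List.getD_eq_getElem?_getD, List.getElem?_eq_getElem hj, Option.getD_some] at this
  have h2 : (G'.getD i [])[j] = f i j := by
    have := he' i hiw j hjh
    rwa [List.getD_eq_getElem?_getD, List.getElem?_eq_getElem ‹j < (G'.getD i []).length›, Option.getD_some] at this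
  rw [h1, h2]

-- any map-over-ranges grid is an IsGrid
lemma rangeGrid_isGrid (w h : Nat) (f : Nat → Nat → Int) :
    IsGrid ((List.range w).map (fun i => (List.range h).map (f i))) w h f := by
  refine ⟨by simp, ?_, ?_⟩
  · intro i hi
    rw [List.getD_eq_getElem?_getD, List.getElem?_map, List.getElem?_eq_getElem (by simpa using hi)]
    simp
  · intro i hi j hj
    simp only [List.getD_eq_getElem?_getD]
    rw [List.getElem?_map, List.getElem?_eq_getElem (l := List.range w) (by simpa using hi)]
    simp only [Option.map_some, Option.getD_some, List.getElem_range]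
    rw [List.getElem?_map, List.getElem?_eq_getElem (l := List.range h) (by simpa using hj)]
    simp [List.getElem_range]

-- A's output is a grid with the max-of-four-differences entry function
lemma portA_isGrid (array : List (List Int)) (w h : Nat)
    (hw : array.length = w) (hh : (array.headD []).length = h) :
    IsGrid (do_operation_gradient array) w h
      (fun i j =>
        max (max (max |pvRead array ((i:Int) - 1) ((j:Int) - 1) - pvRead array ((i:Int) + 1) ((j:Int) + 1)|
                      |pvRead array (i:Int) ((j:Int) - 1) - pvRead array (i:Int) ((j:Int) + 1)|)
                 |pvRead array ((i:Int) + 1) ((j:Int) - 1) - pvRead array ((i:Int) - 1) ((j:Int) + 1)|)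
            |pvRead array ((i:Int) + 1) (j:Int) - pvRead array ((i:Int) - 1) (j:Int)|) := by
  subst hw hh
  -- do_operation_gradient array is definitionally this range-map grid (helper_eq is rfl)
  exact rangeGrid_isGrid array.length (array.headD []).length _

-- ===== VERDICT (by name: the statement is the Claim_ definition above) =====

theorem do_operation_gradient_spec : Claim_equal_do_operation_gradient := by
  intro array _ hpre
  obtain ⟨hne, hrows⟩ := hpre
  unfold Spec_do_operation_gradient
  set w := array.length with hw
  set h := (array.headD []).length with hh
  have hSh : ∀ dx dy : Int, dx = 1 ∨ dx = -1 ∨ dx = 0 → dy = 1 ∨ dy = -1 ∨ dy = 0 →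
      IsGrid (pvShifted array w h dx dy) w h
        (fun i j => pvRead array ((i:Int) + dx) ((j:Int) + dy)) := by
    intro dx dy hdx hdy
    exact shifted_isGrid array w h dx dy rfl rfl hrows hdx hdy
  have hB : IsGrid (do_operation_gradient_alt array) w h
      (fun i j =>
        max (max (max |pvRead array ((i:Int) + (-1)) ((j:Int) + (-1)) - pvRead array ((i:Int) + 1) ((j:Int) + 1)|
                      |pvRead array ((i:Int) + 0) ((j:Int) + (-1)) - pvRead array ((i:Int) + 0) ((j:Int) + 1)|)
                 |pvRead array ((i:Int) + 1) ((j:Int) + (-1)) - pvRead array ((i:Int) + (-1)) ((j:Int) + 1)|)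
            |pvRead array ((i:Int) + 1) ((j:Int) + 0) - pvRead array ((i:Int) + (-1)) ((j:Int) + 0)|) := by
    unfold do_operation_gradient_alt
    simp only [List.foldl_cons, List.foldl_nil]
    exact emax_isGrid _ _ w h _ _
      (emax_isGrid _ _ w h _ _
        (emax_isGrid _ _ w h _ _
          (absdiff_isGrid _ _ w h _ _
            (hSh (-1) (-1) (by norm_num) (by norm_num)) (hSh 1 1 (by norm_num) (by norm_num)))
          (absdiff_isGrid _ _ w h _ _
            (hSh 0 (-1) (by norm_num) (by norm_num)) (hSh 0 1 (by norm_num) (by norm_num))))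
        (absdiff_isGrid _ _ w h _ _
          (hSh 1 (-1) (by norm_num) (by norm_num)) (hSh (-1) 1 (by norm_num) (by norm_num))))
      (absdiff_isGrid _ _ w h _ _
        (hSh 1 0 (by norm_num) (by norm_num)) (hSh (-1) 0 (by norm_num) (by norm_num)))
  have hA := portA_isGrid array w h rfl rfl
  refine grid_eq _ _ w h _ hA ?_
  have hfun : (fun (i j : Nat) =>
        max (max (max |pvRead array ((i:Int) + (-1)) ((j:Int) + (-1)) - pvRead array ((i:Int) + 1) ((j:Int) + 1)|
                      |pvRead array ((i:Int) + 0) ((j:Int) + (-1)) - pvRead array ((i:Int) + 0) ((j:Int) + 1)|)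
                 |pvRead array ((i:Int) + 1) ((j:Int) + (-1)) - pvRead array ((i:Int) + (-1)) ((j:Int) + 1)|)
            |pvRead array ((i:Int) + 1) ((j:Int) + 0) - pvRead array ((i:Int) + (-1)) ((j:Int) + 0)|)
      = (fun (i j : Nat) =>
        max (max (max |pvRead array ((i:Int) - 1) ((j:Int) - 1) - pvRead array ((i:Int) + 1) ((j:Int) + 1)|
                      |pvRead array (i:Int) ((j:Int) - 1) - pvRead array (i:Int) ((j:Int) + 1)|)
                 |pvRead array ((i:Int) + 1) ((j:Int) - 1) - pvRead array ((i:Int) - 1) ((j:Int) + 1)|)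
            |pvRead array ((i:Int) + 1) (j:Int) - pvRead array ((i:Int) - 1) (j:Int)|) := by
    funext i j
    norm_num [sub_eq_add_neg]
  rw [← hfun]
  exact hB
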